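-- pv_equiv track=rewrite | github.com/aralfaruqi/alteraproject | Basic Programming/Problem 2/5 - Digit Perkalian Minimum.py | digitPerkalianMinimum
-- ===== SOURCE A (Python) =====
-- def digitPerkalianMinimum(angka):
--
--     list_bil = [] # list untuk mengisi faktor bilangan dari angka
--     for i in range (1,angka+1):
--         if angka%i == 0:
--             list_bil.append(i) # tiap faktor bilangan ditambahkan ke dalam list_bil
--
--     list_jumlah_digit = [] # list untuk mengisi jumlah digit dari setiap faktor angka
--
--     for i in list_bil:
--         list_jumlah_digit.append(len(str(i))) # tiap jumlah digit faktor bilangan ditambahkan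
--
--
--     list_jumlahdigit_hasilkali = []  # list untuk mengisi jumlah dari pasangan hasil kali
--
--     if len(list_jumlah_digit) == 1: # jika input angka adalah bil. kuadrat < 10
--         return 2
--     else:
--         if len(list_jumlah_digit)%2 == 0: # jika input angka bil. bukan kuadrat >=10
--             for i in range(int(len(list_jumlah_digit)/2)):
--                 list_jumlahdigit_hasilkali.append(list_jumlah_digit[i]+list_jumlah_digit[-i-1])
--
--             minimum = list_jumlahdigit_hasilkali[0]
--             for n in list_jumlahdigit_hasilkali: # Looping untuk mencari nilai min. dari jumlah
--                 if n < minimum:                  # pasangan hasil kali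
--                     minimum = n
--             return minimum
--
--
--         else:
--             for i in range(int(len(list_jumlah_digit)/2)): # jika input angka bil. kuadrat > 10
--                 list_jumlahdigit_hasilkali.append(list_jumlah_digit[i]+list_jumlah_digit[-i-1])
--             list_jumlahdigit_hasilkali.append(2*list_jumlah_digit[int(len(list_jumlah_digit)/2)])
--             minimum = list_jumlahdigit_hasilkali[0]
--             for n in list_jumlahdigit_hasilkali: # Looping untuk mencari nilai min. dari jumlah
--                 if n < minimum:                  # pasangan hasil kali
--                     minimum = n
--             return minimum
-- ===== SOURCE B (Python) =====
-- def digitPerkalianMinimum(angka):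
--     # Trial division up to sqrt(angka): each divisor pair (d, angka//d) is
--     # visited once, keeping a running minimum of the digit-count sum.
--     best = None
--     d = 1
--     while d * d <= angka:
--         if angka % d == 0:
--             s = len(str(d)) + len(str(angka // d))
--             if best is None or s < best:
--                 best = s
--         d += 1
--     return best
-- ===== Notes on version B (the rewrite author's own statement) =====
-- stated objective: faster
-- what changed: Replaces A's O(n) scan over 1..n that builds the complete divisor list and then pairs it index-by-reverse-index with trial division up to sqrt(n) that keeps a running minimum of the digit-count sum of each divisor pair.
import Mathlib
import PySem

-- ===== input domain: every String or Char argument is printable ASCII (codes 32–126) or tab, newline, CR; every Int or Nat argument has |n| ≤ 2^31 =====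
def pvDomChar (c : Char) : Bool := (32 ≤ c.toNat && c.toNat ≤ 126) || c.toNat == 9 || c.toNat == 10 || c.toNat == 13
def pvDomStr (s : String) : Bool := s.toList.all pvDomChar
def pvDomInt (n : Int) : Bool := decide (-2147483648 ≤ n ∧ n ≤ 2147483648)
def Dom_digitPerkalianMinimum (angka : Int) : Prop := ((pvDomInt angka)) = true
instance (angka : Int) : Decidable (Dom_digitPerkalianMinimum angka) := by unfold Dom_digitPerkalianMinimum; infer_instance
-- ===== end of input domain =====

-- B replaces A's O(n) scan over 1..n (building the full divisor list and pairing it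
-- index-by-reverse-index) with trial division up to √n keeping a running minimum.

-- ===== PORT A =====
-- len(str(i)), used by both ports
def pvDigits (i : Int) : Int := PySem.Str.len (PySem.Int.toStr i)

def digitPerkalianMinimum (angka : Int) : Int :=
  let list_bil := (PySem.List.pyRange 1 (angka + 1)).foldl
    (fun acc i => if PySem.Int.mod angka i = 0 then acc ++ [i] else acc) []
  let list_jumlah_digit := list_bil.foldl (fun acc i => acc ++ [pvDigits i]) []
  if list_jumlah_digit.length = 1 then 2
  else
    if PySem.Int.mod (list_jumlah_digit.length : Int) 2 = 0 then
      let lh := (PySem.List.pyRange 0 (PySem.Int.floordiv (list_jumlah_digit.length : Int) 2)).foldl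
        (fun acc i => acc ++ [PySem.List.pyGetD list_jumlah_digit i 0 +
                              PySem.List.pyGetD list_jumlah_digit (-i - 1) 0]) []
      match lh with
      | [] => 0  -- unreachable under Pre_: Python raises IndexError here (angka ≤ 0)
      | m0 :: _ => lh.foldl (fun m n => if n < m then n else m) m0
    else
      let lh := (PySem.List.pyRange 0 (PySem.Int.floordiv (list_jumlah_digit.length : Int) 2)).foldl
        (fun acc i => acc ++ [PySem.List.pyGetD list_jumlah_digit i 0 +
                              PySem.List.pyGetD list_jumlah_digit (-i - 1) 0]) []
      let lh' := lh ++ [2 * PySem.List.pyGetD list_jumlah_digit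
                              (PySem.Int.floordiv (list_jumlah_digit.length : Int) 2) 0]
      match lh' with
      | [] => 0  -- unreachable (lh' ends with an appended element)
      | m0 :: _ => lh'.foldl (fun m n => if n < m then n else m) m0

-- ===== PORT B =====
-- termination fact for the while-loop: d*d ≤ angka bounds d by angka
theorem pvLe_mul_self (d : Int) : d ≤ d * d := by
  nlinarith [mul_self_nonneg d, mul_self_nonneg (d - 1)]

-- the `while d * d <= angka` loop of B, with its running minimum `best`
def pvAltGo (angka d : Int) (best : Option Int) : Option Int :=
  if d * d ≤ angka then
    let best' :=
      if PySem.Int.mod angka d = 0 then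
        let s := pvDigits d + pvDigits (PySem.Int.floordiv angka d)
        match best with
        | none => some s
        | some b => if s < b then some s else some b
      else best
    pvAltGo angka (d + 1) best'
  else best
termination_by (angka + 1 - d).toNat
decreasing_by have := pvLe_mul_self d; omega

def digitPerkalianMinimum_alt (angka : Int) : Int :=
  match pvAltGo angka 1 none with
  | some m => m
  | none => 0  -- unreachable under Pre_: Python B returns None here (angka ≤ 0)

-- ===== PRECONDITION & SPEC =====
-- Pre_ excludes exactly angka ≤ 0, where A raises IndexError (empty divisor list).
def Pre_digitPerkalianMinimum (angka : Int) : Prop := 1 ≤ angka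
instance (angka : Int) : Decidable (Pre_digitPerkalianMinimum angka) := by
  unfold Pre_digitPerkalianMinimum; infer_instance
def pvWitness_digitPerkalianMinimum : Int := 12

def Spec_digitPerkalianMinimum (angka : Int) (out : Int) : Prop := out = digitPerkalianMinimum_alt angka
instance (angka : Int) (out : Int) : Decidable (Spec_digitPerkalianMinimum angka out) := by unfold Spec_digitPerkalianMinimum; infer_instance

-- ===== CLAIM (what is proved, stated in full; the proofs are below) =====
def Claim_equal_digitPerkalianMinimum : Prop := ∀ (angka : Int), Dom_digitPerkalianMinimum angka → Pre_digitPerkalianMinimum angka → Spec_digitPerkalianMinimum angka (digitPerkalianMinimum angka)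

-- ===== LEMMAS AND PROOFS =====

-- the digit-sum of a divisor pair (d, n // d)
def pvF (n d : Int) : Int := pvDigits d + pvDigits (PySem.Int.floordiv n d)

-- A's ascending divisor list
def pvL (n : Int) : List Int :=
  (PySem.List.pyRange 1 (n + 1)).filter (fun i => decide (PySem.Int.mod n i = 0))

-- B's running-minimum step on Option
def pvObStep (best : Option Int) (s : Int) : Option Int :=
  match best with
  | none => some s
  | some b => if s < b then some s else some b

-- A's first-element-then-scan minimum
def pvMinScan : List Int → Int
  | [] => 0
  | m0 :: t => t.foldl (fun m s => if s < m then s else m) m0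

-- the increasing list d, d+1, … while d*d ≤ n
def pvUpTo (n d : Int) : List Int :=
  if d * d ≤ n then d :: pvUpTo n (d + 1) else []
termination_by (n + 1 - d).toNat
decreasing_by have := pvLe_mul_self d; omega

theorem mem_pvL {n x : Int} : x ∈ pvL n ↔ 1 ≤ x ∧ x < n + 1 ∧ x ∣ n := by
  simp [pvL, PySem.List.mem_pyRange_one, PySem.Int.mod_eq_zero_iff_dvd, and_assoc]

theorem pairwise_pvL (n : Int) : (pvL n).Pairwise (· < ·) :=
  (PySem.List.pairwise_lt_pyRange_one 1 (n + 1)).filter _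

theorem nodup_pvL (n : Int) : (pvL n).Nodup :=
  (pairwise_pvL n).imp ne_of_lt

theorem pvDiv_mem {n x : Int} (hn : 1 ≤ n) (hx : x ∈ pvL n) : n / x ∈ pvL n := by
  rcases mem_pvL.mp hx with ⟨hx1, _, hxd⟩
  have hmul : x * (n / x) = n := Int.mul_ediv_cancel' hxd
  have hq1 : 1 ≤ n / x := by nlinarith
  have hqd : n / x ∣ n := ⟨x, by linarith [hmul, mul_comm x (n / x)]⟩
  exact mem_pvL.mpr ⟨hq1, by have := Int.le_of_dvd (by omega) hqd; omega, hqd⟩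

theorem pvDiv_div {n x : Int} (hn : 1 ≤ n) (hx : x ∈ pvL n) : n / (n / x) = x := by
  rcases mem_pvL.mp hx with ⟨hx1, _, hxd⟩
  have hmul : x * (n / x) = n := Int.mul_ediv_cancel' hxd
  have hq1 : 1 ≤ n / x := by nlinarith
  calc n / (n / x) = ((n / x) * x) / (n / x) := by rw [mul_comm, hmul]
    _ = x := Int.mul_ediv_cancel_left x (by omega)

theorem pvDiv_lt {n x y : Int} (_hn : 1 ≤ n) (hx : x ∈ pvL n) (hy : y ∈ pvL n)
    (hxy : x < y) : n / y < n / x := by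
  rcases mem_pvL.mp hx with ⟨hx1, _, hxd⟩
  rcases mem_pvL.mp hy with ⟨hy1, _, hyd⟩
  have hmx : x * (n / x) = n := Int.mul_ediv_cancel' hxd
  have hmy : y * (n / y) = n := Int.mul_ediv_cancel' hyd
  have hqx : 1 ≤ n / x := by nlinarith
  have hqy : 1 ≤ n / y := by nlinarith
  nlinarith

theorem rev_pvL {n : Int} (hn : 1 ≤ n) :
    (pvL n).reverse = (pvL n).map (fun x => n / x) := by
  have hnd : (pvL n).Nodup := nodup_pvL n
  have hndm : ((pvL n).map (fun x => n / x)).Nodup := by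
    refine hnd.map_on ?_
    intro x hx y hy hxy
    rw [← pvDiv_div hn hx, ← pvDiv_div hn hy, hxy]
  have hperm : (pvL n).reverse.Perm ((pvL n).map (fun x => n / x)) := by
    refine ((pvL n).reverse_perm.trans ?_)
    refine List.perm_of_nodup_nodup_toFinset_eq hnd hndm ?_
    ext a
    simp only [List.mem_toFinset, List.mem_map]
    constructor
    · intro ha
      exact ⟨n / a, pvDiv_mem hn ha, pvDiv_div hn ha⟩
    · rintro ⟨x, hx, rfl⟩
      exact pvDiv_mem hn hx
  have hps : (pvL n).reverse.Pairwise (· > ·) := by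
    rw [List.pairwise_reverse]
    exact pairwise_pvL n
  have hpm : ((pvL n).map (fun x => n / x)).Pairwise (· > ·) := by
    rw [List.pairwise_iff_getElem] at *
    intro i j hi hj hij
    simp only [List.getElem_map]
    have hilen : i < (pvL n).length := by simpa using hi
    have hjlen : j < (pvL n).length := by simpa using hj
    have hlt : (pvL n)[i] < (pvL n)[j] := by
      have := List.pairwise_iff_getElem.mp (pairwise_pvL n) i j hilen hjlen hij
      exact this
    exact pvDiv_lt hn (List.getElem_mem _) (List.getElem_mem _) hlt
  exact hperm.eq_of_pairwise (fun a b _ _ h1 h2 => by omega) hps hpm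

theorem getElem_rev_pvL {n : Int} (hn : 1 ≤ n) {i : Nat} (hi : i < (pvL n).length) :
    (pvL n)[(pvL n).length - 1 - i]'(by omega) = n / (pvL n)[i] := by
  have h1 : (pvL n).reverse[i]'(by simpa using hi) = (pvL n)[(pvL n).length - 1 - i]'(by omega) := by
    rw [List.getElem_reverse]
  have h2 : ((pvL n).map (fun x => n / x))[i]'(by simpa using hi) = n / (pvL n)[i] := by
    rw [List.getElem_map]
  rw [← h1, ← h2]
  congr 1
  exact rev_pvL hn

theorem sq_iff_pvL {n : Int} (hn : 1 ≤ n) {i : Nat} (hi : i < (pvL n).length) :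
    (pvL n)[i] * (pvL n)[i] ≤ n ↔ i < ((pvL n).length + 1) / 2 := by
  set k := (pvL n).length with hk
  have hj : k - 1 - i < k := by omega
  have hmem : (pvL n)[i] ∈ pvL n := List.getElem_mem _
  have ha1 : 1 ≤ (pvL n)[i] := (mem_pvL.mp hmem).1
  have had : (pvL n)[i] ∣ n := (mem_pvL.mp hmem).2.2
  have hmul : (pvL n)[i] * ((pvL n)[k - 1 - i]'hj) = n := by
    rw [getElem_rev_pvL hn hi]
    exact Int.mul_ediv_cancel' had
  have hb1 : 1 ≤ (pvL n)[k - 1 - i]'hj :=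
    (mem_pvL.mp (List.getElem_mem _)).1
  have hmono : ∀ {p q : Nat} (hp : p < k) (hq : q < k), p < q →
      (pvL n)[p]'hp < (pvL n)[q]'hq := fun hp hq hpq =>
    List.pairwise_iff_getElem.mp (pairwise_pvL n) _ _ hp hq hpq
  constructor
  · intro hsq
    by_contra hge
    push Not at hge
    have hlt : k - 1 - i < i := by omega
    have := hmono hj hi hlt
    nlinarith
  · intro hlt
    rcases Nat.lt_or_ge i (k - 1 - i) with h | h
    · have := hmono hi hj h
      nlinarith
    · have heq : i = k - 1 - i := by omega
      have : (pvL n)[i] = (pvL n)[k - 1 - i]'hj := by congr 1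
      nlinarith

theorem filter_take_pvL {n : Int} (hn : 1 ≤ n) :
    (pvL n).filter (fun d => decide (d * d ≤ n)) = (pvL n).take (((pvL n).length + 1) / 2) := by
  set k := (pvL n).length with hk
  set m := (k + 1) / 2 with hm
  conv_lhs => rw [← List.take_append_drop m (pvL n)]
  rw [List.filter_append]
  have h1 : ((pvL n).take m).filter (fun d => decide (d * d ≤ n)) = (pvL n).take m := by
    apply List.filter_eq_self.mpr
    intro a ha
    rcases List.mem_iff_getElem.mp ha with ⟨i, hilen, rfl⟩
    have hitk : i < k := by
      have := hilen; simp [List.length_take] at this; omega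
    rw [List.getElem_take]
    simpa using (sq_iff_pvL hn hitk).mpr (by
      have := hilen; simp [List.length_take] at this; omega)
  have h2 : ((pvL n).drop m).filter (fun d => decide (d * d ≤ n)) = [] := by
    apply List.filter_eq_nil_iff.mpr
    intro a ha
    rcases List.mem_iff_getElem.mp ha with ⟨j, hjlen, rfl⟩
    have hjk : m + j < k := by
      have := hjlen; simp [List.length_drop] at this; omega
    rw [List.getElem_drop]
    simp only [decide_eq_true_eq]
    intro hsq
    have := (sq_iff_pvL hn hjk).mp hsq
    omega
  rw [h1, h2, List.append_nil]

theorem pvUpTo_eq {n d : Int} (hd : 1 ≤ d) :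
    pvUpTo n d = (PySem.List.pyRange d (n + 1)).filter (fun e => decide (e * e ≤ n)) := by
  revert hd
  induction d using pvUpTo.induct (n := n) with
  | case1 d h ih =>
    intro hd
    have hdn : d ≤ n := le_trans (pvLe_mul_self d) h
    rw [pvUpTo, if_pos h, PySem.List.pyRange_one_cons (by omega), List.filter_cons,
      if_pos (by simpa using h)]
    exact congrArg _ (ih (by omega))
  | case2 d h =>
    intro hd
    rw [pvUpTo, if_neg h]
    symm
    apply List.filter_eq_nil_iff.mpr
    intro e he
    have hde : d ≤ e := (PySem.List.mem_pyRange_one.mp he).1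
    simp only [decide_eq_true_eq]
    intro hsq
    exact h (le_trans (mul_le_mul hde hde (by omega) (by omega)) hsq)

theorem pvAltGo_eq (n : Int) : ∀ (k : Nat) (d : Int) (best : Option Int), (n + 1 - d).toNat = k →
    pvAltGo n d best =
      (((pvUpTo n d).filter (fun e => decide (PySem.Int.mod n e = 0))).map (pvF n)).foldl pvObStep best := by
  intro k
  induction k using Nat.strong_induction_on with
  | _ k ih =>
    intro d best hk
    rw [pvAltGo, pvUpTo]
    by_cases h : d * d ≤ n
    · rw [if_pos h, if_pos h, List.filter_cons]
      have hrec := fun b => ih (n + 1 - (d + 1)).toNat (by have := pvLe_mul_self d; omega) (d + 1) b rfl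
      show pvAltGo n (d + 1) (if PySem.Int.mod n d = 0 then
          match best with
          | none => some (pvDigits d + pvDigits (PySem.Int.floordiv n d))
          | some b => if pvDigits d + pvDigits (PySem.Int.floordiv n d) < b then
              some (pvDigits d + pvDigits (PySem.Int.floordiv n d)) else some b
        else best) = _
      rw [hrec]
      by_cases hm : PySem.Int.mod n d = 0
      · rw [if_pos hm, if_pos (by simpa using hm)]
        simp only [List.map_cons, List.foldl_cons]
        congr 1
      · rw [if_neg hm, if_neg (by simpa using hm)]
    · rw [if_neg h, if_neg h]
      rfl

theorem foldl_pvObStep_some (t : List Int) (b : Int) :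
    t.foldl pvObStep (some b) = some (t.foldl (fun m s => if s < m then s else m) b) := by
  induction t generalizing b with
  | nil => rfl
  | cons h t ih =>
    simp only [List.foldl_cons, pvObStep]
    split_ifs <;> exact ih _

theorem length_pvL_ge_two {n : Int} (hn : 2 ≤ n) : 2 ≤ (pvL n).length := by
  have h1 : (1 : Int) ∈ pvL n := mem_pvL.mpr ⟨le_refl 1, by omega, one_dvd n⟩
  have h2 : n ∈ pvL n := mem_pvL.mpr ⟨by omega, by omega, dvd_refl n⟩
  have hsub : ({1, n} : Finset Int) ⊆ (pvL n).toFinset := by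
    intro x hx
    rcases Finset.mem_insert.mp hx with rfl | hx
    · simpa using h1
    · rcases Finset.mem_singleton.mp hx with rfl
      simpa using h2
  have hcard : ({1, n} : Finset Int).card = 2 := by
    rw [Finset.card_insert_of_notMem (by simp; omega), Finset.card_singleton]
  calc 2 = ({1, n} : Finset Int).card := hcard.symm
    _ ≤ (pvL n).toFinset.card := Finset.card_le_card hsub
    _ ≤ (pvL n).length := (pvL n).toFinset_card_le

theorem pvMinScan_eq (l : List Int) :
    (match l with
      | [] => (0 : Int)
      | m0 :: _ => l.foldl (fun m s => if s < m then s else m) m0) = pvMinScan l := by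
  cases l with
  | nil => rfl
  | cons h t => simp only [pvMinScan, List.foldl_cons, if_neg (lt_irrefl h)]

theorem length_pvL_pos {n : Int} (hn : 1 ≤ n) : 0 < (pvL n).length := by
  have h1 : (1 : Int) ∈ pvL n := mem_pvL.mpr ⟨le_refl 1, by omega, one_dvd n⟩
  exact List.length_pos_iff.mpr (fun hnil => absurd (hnil ▸ h1) (List.not_mem_nil))

theorem H_map {n : Int} (hn : 1 ≤ n) {m : Nat} (hm : m ≤ ((pvL n).length + 1) / 2) :
    (List.range m).map ((fun i => PySem.List.pyGetD ((pvL n).map pvDigits) i 0 +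
        PySem.List.pyGetD ((pvL n).map pvDigits) (-i - 1) 0) ∘ (fun (j : Nat) => (j : Int)))
      = ((pvL n).take m).map (pvF n) := by
  have hk1 := length_pvL_pos hn
  have hmk : m ≤ (pvL n).length := by omega
  apply List.ext_getElem
  · simp
    omega
  · intro i h1 h2
    simp at h1
    have hik : i < (pvL n).length := by omega
    simp only [List.getElem_map, List.getElem_range, Function.comp_apply, List.getElem_take]
    rw [PySem.List.pyGetD_eq_getElem _ _ (by positivity)
      (by simp only [List.length_map]; exact_mod_cast hik)]
    rw [show (-(i : Int) - 1) = -(((i + 1 : Nat) : Int)) from by push_cast; ring]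
    rw [PySem.List.pyGetD_neg_natCast _ (i + 1) 0 (by omega)
      (by simp only [List.length_map]; omega)]
    simp only [List.getElem_map, Int.toNat_natCast, List.length_map]
    simp only [show (pvL n).length - (i + 1) = (pvL n).length - 1 - i from by omega]
    have hrev := getElem_rev_pvL hn hik
    have hpos : 0 < (pvL n)[i] := by
      have := (mem_pvL.mp (List.getElem_mem hik)).1; omega
    unfold pvF
    rw [PySem.Int.floordiv_eq_ediv_of_pos hpos, ← hrev]

theorem A_char {n : Int} (hn : 2 ≤ n) :
    digitPerkalianMinimum n =
      pvMinScan (((pvL n).take (((pvL n).length + 1) / 2)).map (pvF n)) := by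
  have hn1 : (1 : Int) ≤ n := by omega
  have hk2 := length_pvL_ge_two hn
  have h1 : (PySem.List.pyRange 1 (n + 1)).foldl
      (fun acc i => if PySem.Int.mod n i = 0 then acc ++ [i] else acc) [] = pvL n := by
    rw [show (fun (acc : List Int) i => if PySem.Int.mod n i = 0 then acc ++ [i] else acc)
        = (fun (acc : List Int) i =>
            if (fun i => decide (PySem.Int.mod n i = 0)) i = true then acc ++ [id i] else acc)
      from by funext acc i; simp]
    rw [PySem.List.foldl_append_if]
    simp [pvL]
  have h2 : (pvL n).foldl (fun acc i => acc ++ [pvDigits i]) [] = (pvL n).map pvDigits := by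
    rw [PySem.List.foldl_append_singleton_eq_map, List.nil_append]
  simp only [digitPerkalianMinimum, h1, h2, List.length_map]
  rw [if_neg (by omega : ¬ (pvL n).length = 1)]
  rw [show PySem.Int.mod (↑(pvL n).length) 2 = (((pvL n).length % 2 : Nat) : Int) from by
    exact_mod_cast PySem.Int.mod_natCast (pvL n).length 2]
  rw [show PySem.Int.floordiv (↑(pvL n).length) 2 = (((pvL n).length / 2 : Nat) : Int) from by
    exact_mod_cast PySem.Int.floordiv_natCast (pvL n).length 2]
  by_cases hpar : (pvL n).length % 2 = 0
  · rw [if_pos (by exact_mod_cast hpar)]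
    rw [PySem.List.foldl_append_singleton_eq_map, List.nil_append,
      PySem.List.pyRange_zero_natCast, List.map_map]
    rw [H_map hn1 (by omega)]
    rw [show (pvL n).length / 2 = ((pvL n).length + 1) / 2 from by omega]
    exact pvMinScan_eq _
  · rw [if_neg (by exact_mod_cast hpar)]
    rw [PySem.List.foldl_append_singleton_eq_map, List.nil_append,
      PySem.List.pyRange_zero_natCast, List.map_map]
    rw [H_map hn1 (by omega)]
    have hhalf : (pvL n).length / 2 < (pvL n).length := by omega
    rw [PySem.List.pyGetD_eq_getElem _ _ (by positivity)
      (by simp only [List.length_map]; exact_mod_cast hhalf)]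
    simp only [List.getElem_map, Int.toNat_natCast]
    have hdiv : n / (pvL n)[(pvL n).length / 2] = (pvL n)[(pvL n).length / 2] := by
      have := getElem_rev_pvL hn1 hhalf
      simp only [show (pvL n).length - 1 - (pvL n).length / 2 = (pvL n).length / 2 from by omega] at this
      exact this.symm
    have hpos : 0 < (pvL n)[(pvL n).length / 2] := by
      have := (mem_pvL.mp (List.getElem_mem hhalf)).1; omega
    have hmid : 2 * pvDigits (pvL n)[(pvL n).length / 2] = pvF n (pvL n)[(pvL n).length / 2] := by
      unfold pvF
      rw [PySem.Int.floordiv_eq_ediv_of_pos hpos, hdiv]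
      ring
    rw [hmid]
    have happ : ((pvL n).take ((pvL n).length / 2)).map (pvF n) ++ [pvF n (pvL n)[(pvL n).length / 2]]
        = ((pvL n).take ((pvL n).length / 2 + 1)).map (pvF n) := by
      rw [List.take_add_one, List.getElem?_eq_getElem hhalf]
      simp only [Option.toList_some, List.map_append, List.map_cons, List.map_nil,
        List.map_take]
    rw [happ, show (pvL n).length / 2 + 1 = ((pvL n).length + 1) / 2 from by omega]
    exact pvMinScan_eq _

theorem B_char {n : Int} (hn : 1 ≤ n) :
    digitPerkalianMinimum_alt n =
      pvMinScan (((pvL n).take (((pvL n).length + 1) / 2)).map (pvF n)) := by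
  have hfil : (pvUpTo n 1).filter (fun e => decide (PySem.Int.mod n e = 0)) =
      (pvL n).take (((pvL n).length + 1) / 2) := by
    rw [pvUpTo_eq (le_refl 1), List.filter_filter, ← filter_take_pvL hn, pvL,
      List.filter_filter]
    exact List.filter_congr (fun a _ => by rw [Bool.and_comm])
  have hgo := pvAltGo_eq n (n + 1 - 1).toNat 1 none rfl
  rw [hfil] at hgo
  -- the candidate list is nonempty: 1 is a divisor, so pvL n ≠ []
  have hne : pvL n ≠ [] := by
    intro hnil
    have h1 : (1 : Int) ∈ pvL n := mem_pvL.mpr ⟨le_refl 1, by omega, one_dvd n⟩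
    rw [hnil] at h1
    exact absurd h1 (List.not_mem_nil)
  have hlen : 0 < (pvL n).length := List.length_pos_iff.mpr hne
  have hlen2 : 0 < (((pvL n).take (((pvL n).length + 1) / 2)).map (pvF n)).length := by
    simp only [List.length_map, List.length_take]
    omega
  obtain ⟨h, t, hht⟩ := List.exists_cons_of_ne_nil (List.ne_nil_of_length_pos hlen2)
  unfold digitPerkalianMinimum_alt
  rw [hgo, hht]
  simp only [List.foldl_cons]
  have h0 : pvObStep none h = some h := rfl
  rw [h0, foldl_pvObStep_some]
  rfl

-- ===== VERDICT (by name: the statement is the Claim_ definition above) =====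
theorem digitPerkalianMinimum_spec : Claim_equal_digitPerkalianMinimum := by
  intro n _ hpre
  unfold Spec_digitPerkalianMinimum
  have hn : 1 ≤ n := hpre
  rcases eq_or_lt_of_le hn with h1 | h2
  · -- n = 1: both sides evaluate to 2
    subst h1
    rw [B_char (le_refl 1)]
    decide
  · rw [A_char h2, B_char hn]
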